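-- pv_equiv track=rewrite | github.com/littlelilyjiang/two_leetcode_daybyday | easy/num_mst0102.py | CheckPermutation
-- ===== SOURCE A (Python) =====
-- def CheckPermutation(s1, s2):
--     list_s1= list(s1)
--     list_s2 = list(s2)
--     for i in list_s1:
--         if i in list_s2:
--             list_s2.remove(i)
--     if len(list_s2) == 0:
--         return True
--     else:
--         return False
-- ===== SOURCE B (Python) =====
-- def CheckPermutation(s1, s2):
--     counts = {}
--     for c in s1:
--         counts[c] = counts.get(c, 0) + 1
--     for c in s2:
--         n = counts.get(c, 0)
--         if n == 0:
--             return False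
--         counts[c] = n - 1
--     return True
-- ===== Notes on version B (the rewrite author's own statement) =====
-- stated objective: faster
-- what changed: Replaced the per-character membership scan and list.remove over a shrinking copy of s2 by a single character-count dictionary built from s1 that is decremented while scanning s2 once.
import Mathlib
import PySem

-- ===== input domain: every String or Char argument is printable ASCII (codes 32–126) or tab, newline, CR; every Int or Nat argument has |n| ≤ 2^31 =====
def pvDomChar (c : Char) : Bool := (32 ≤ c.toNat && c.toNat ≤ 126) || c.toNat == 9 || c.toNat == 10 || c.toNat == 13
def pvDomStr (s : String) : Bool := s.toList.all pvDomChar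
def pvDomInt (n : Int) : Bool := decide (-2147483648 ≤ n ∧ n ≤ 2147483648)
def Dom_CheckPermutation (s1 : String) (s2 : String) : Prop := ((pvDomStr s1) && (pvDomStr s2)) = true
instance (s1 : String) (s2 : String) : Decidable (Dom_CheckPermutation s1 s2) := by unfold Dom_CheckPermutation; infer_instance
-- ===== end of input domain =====

-- B replaces A's repeated membership scans + list.remove by one count dictionary: asymptotically faster.

-- ===== PORT A =====
-- 'for i in list_s1: if i in list_s2: list_s2.remove(i)' — remove? removes the first occurrence, as Python
def CheckPermutation (s1 : String) (s2 : String) : Bool :=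
  let list_s1 := s1.toList
  let list_s2 := s2.toList
  let final := list_s1.foldl
    (fun l2 i => if l2.contains i then (PySem.List.remove? l2 i).getD l2 else l2) list_s2
  if final.length = 0 then true else false

-- ===== PORT B =====
-- 'for c in s2: n = counts.get(c, 0); if n == 0: return False; counts[c] = n - 1'
def CheckPermutation_altLoop : List Char → PySem.Dict Char Int → Bool
  | [], _ => true
  | c :: rest, counts =>
    let n := counts.getD c 0
    if n = 0 then false else CheckPermutation_altLoop rest (counts.insert c (n - 1))

def CheckPermutation_alt (s1 : String) (s2 : String) : Bool :=
  let counts := s1.toList.foldl (fun d c => d.insert c (d.getD c 0 + 1)) PySem.Dict.empty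
  CheckPermutation_altLoop s2.toList counts

-- ===== PRECONDITION & SPEC =====
def Spec_CheckPermutation (s1 : String) (s2 : String) (out : Bool) : Prop := out = CheckPermutation_alt s1 s2
instance (s1 : String) (s2 : String) (out : Bool) : Decidable (Spec_CheckPermutation s1 s2 out) := by unfold Spec_CheckPermutation; infer_instance

-- ===== CLAIM (what is proved, stated in full; the proofs are below) =====
def Claim_equal_CheckPermutation : Prop := ∀ (s1 : String) (s2 : String), Dom_CheckPermutation s1 s2 → Spec_CheckPermutation s1 s2 (CheckPermutation s1 s2)


-- ===== LEMMAS AND PROOFS =====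

-- A's loop: after folding l1 over l2, each character's count is count l2 c - min (count l1 c) (count l2 c)
theorem pv_countA (l1 l2 : List Char) (c : Char) :
    (l1.foldl (fun l2 i => if l2.contains i then (PySem.List.remove? l2 i).getD l2 else l2) l2).count c
      = l2.count c - min (l1.count c) (l2.count c) := by
  induction l1 generalizing l2 with
  | nil => simp
  | cons i t ih =>
    simp only [List.foldl_cons]
    by_cases hmem : i ∈ l2
    · rw [if_pos (by simpa using hmem), PySem.List.remove?_eq_some_erase l2 i hmem,
        Option.getD_some, ih]
      have herase : (l2.erase i).count c = l2.count c - if i = c then 1 else 0 := by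
        rw [List.count_erase]; simp
      have hpos : 0 < l2.count i := List.count_pos_iff.mpr hmem
      rw [herase]
      by_cases hc : i = c
      · subst hc
        simp only [if_pos rfl]
        simp [List.count_cons]
        omega
      · simp only [if_neg hc]
        simp [List.count_cons, hc]
    · rw [if_neg (by simpa using hmem), ih]
      have hz : l2.count i = 0 := List.count_eq_zero.mpr hmem
      by_cases hc : i = c
      · subst hc
        simp [List.count_cons]
        omega
      · simp [List.count_cons, hc]

theorem pv_foldA_nil (l1 l2 : List Char) :
    (l1.foldl (fun l2 i => if l2.contains i then (PySem.List.remove? l2 i).getD l2 else l2) l2) = []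
      ↔ ∀ c, l2.count c ≤ l1.count c := by
  constructor
  · intro h c
    have hc := pv_countA l1 l2 c
    rw [h] at hc
    simp only [List.count_nil] at hc
    omega
  · intro h
    rw [List.eq_nil_iff_forall_not_mem]
    intro c hc
    have hpos := List.count_pos_iff.mpr hc
    rw [pv_countA] at hpos
    have := h c
    omega

theorem pv_A_iff (s1 s2 : String) :
    CheckPermutation s1 s2 = true ↔ ∀ c, s2.toList.count c ≤ s1.toList.count c := by
  have hdef : CheckPermutation s1 s2 =
      (if (s1.toList.foldl
            (fun l2 i => if l2.contains i then (PySem.List.remove? l2 i).getD l2 else l2)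
            s2.toList).length = 0 then true else false) := rfl
  rw [hdef]
  split_ifs with h
  · exact iff_of_true rfl ((pv_foldA_nil _ _).mp (List.length_eq_zero_iff.mp h))
  · refine iff_of_false (by simp) (fun hall => h ?_)
    rw [(pv_foldA_nil _ _).mpr hall]
    rfl

-- B's loop (over a dict with nonnegative values) returns true iff every character still has enough budget
theorem pv_B_loop_iff (l2 : List Char) (d : PySem.Dict Char Int)
    (hnn : ∀ x, 0 ≤ d.getD x 0) :
    CheckPermutation_altLoop l2 d = true ↔ ∀ c, (l2.count c : Int) ≤ d.getD c 0 := by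
  induction l2 generalizing d with
  | nil =>
    simp only [CheckPermutation_altLoop, List.count_nil, Int.ofNat_zero, true_iff]
    intro c
    simpa using hnn c
  | cons c rest ih =>
    simp only [CheckPermutation_altLoop]
    by_cases hz : d.getD c 0 = 0
    · rw [if_pos hz]
      refine iff_of_false (by simp) (fun hall => ?_)
      have hc := hall c
      rw [hz] at hc
      simp [List.count_cons] at hc
      have hrest : (0:Int) ≤ rest.count c := Int.natCast_nonneg _
      omega
    · rw [if_neg hz]
      have hpos : 1 ≤ d.getD c 0 := by have := hnn c; omega
      have hnn' : ∀ x, 0 ≤ (d.insert c (d.getD c 0 - 1)).getD x 0 := by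
        intro x
        rw [PySem.Dict.getD_insert]
        by_cases hxc : x = c
        · rw [if_pos hxc]; omega
        · rw [if_neg hxc]; exact hnn x
      rw [ih _ hnn']
      constructor
      · intro h x
        have hx := h x
        rw [PySem.Dict.getD_insert] at hx
        by_cases hxc : x = c
        · subst hxc
          rw [if_pos rfl] at hx
          simp [List.count_cons]
          push_cast at hx ⊢
          omega
        · rw [if_neg hxc] at hx
          simp [List.count_cons, Ne.symm hxc]
          exact hx
      · intro h x
        have hx := h x
        rw [PySem.Dict.getD_insert]
        by_cases hxc : x = c
        · subst hxc
          rw [if_pos rfl]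
          simp [List.count_cons] at hx
          push_cast at hx ⊢
          omega
        · rw [if_neg hxc]
          simp [List.count_cons, Ne.symm hxc] at hx
          exact hx

theorem pv_B_iff (s1 s2 : String) :
    CheckPermutation_alt s1 s2 = true ↔ ∀ c, s2.toList.count c ≤ s1.toList.count c := by
  unfold CheckPermutation_alt
  have hget : ∀ v, (s1.toList.foldl (fun d c => d.insert c (d.getD c 0 + 1))
      PySem.Dict.empty).getD v 0 = (s1.toList.count v : Int) := by
    intro v
    rw [PySem.Dict.getD_foldl_insert_add_one, PySem.Dict.getD_empty]
    omega
  rw [pv_B_loop_iff _ _ (fun x => by rw [hget]; exact Int.natCast_nonneg _)]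
  constructor <;> intro h c <;> have hc := h c <;> rw [hget] at * <;> omega

-- ===== VERDICT (by name: the statement is the Claim_ definition above) =====
theorem CheckPermutation_spec : Claim_equal_CheckPermutation := by
  intro s1 s2 _
  unfold Spec_CheckPermutation
  rw [Bool.eq_iff_iff, pv_A_iff, pv_B_iff]
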